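-- pv_equiv track=rewrite | github.com/Jaywhisker/HDB_Planters | hdb-spatial-placement/notebooks/grid_hatching.py | _select_numbers
-- ===== SOURCE A (Python) =====
-- def _select_numbers(BSH=0, NBSL=0, NBSH=0, BSL=0, startingNumber=3):
--     """
--     Selects integers for each category based on the specified conditions:
--     - BSH: Border, shade hating (not a multiple of 2, multiple of 3)
--     - NBSL: Not Border, shade loving (multiple of 2, not a multiple of 3)
--     - NBSH: Not Border, shade hating (not a multiple of 2, not a multiple of 3)
--     - BSL: Border, shade loving (multiple of 2, multiple of 3)
--
--     Args:
--         BSH (int): Number of integers required for Border, shade hating condition.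
--         NBSL (int): Number of integers required for Not Border, shade loving condition.
--         NBSH (int): Number of integers required for Not Border, shade hating condition.
--         BSL (int): Number of integers required for Border, shade loving condition.
--         startingNumber (int): The number to start iterating from.
--
--     Returns:
--         dict: A dictionary with keys 'BSH', 'NBSL', 'NBSH', 'BSL' and lists of integers as values.
--     """
--     result = {"BSH": [], "NBSL": [], "NBSH": [], "BSL": []}
--     current_number = startingNumber
--
--     while len(result["BSH"]) < BSH or len(result["NBSL"]) < NBSL or len(result["NBSH"]) < NBSH or len(result["BSL"]) < BSL:
--         if current_number % 2 != 0 and current_number % 3 == 0 and len(result["BSH"]) < BSH: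
--             result["BSH"].append(current_number)
--         elif current_number % 2 == 0 and current_number % 3 != 0 and len(result["NBSL"]) < NBSL:
--             result["NBSL"].append(current_number)
--         elif current_number % 2 != 0 and current_number % 3 != 0 and len(result["NBSH"]) < NBSH:
--             result["NBSH"].append(current_number)
--         elif current_number % 2 == 0 and current_number % 3 == 0 and len(result["BSL"]) < BSL:
--             result["BSL"].append(current_number)
--
--         current_number += 1
--
--     return result
-- ===== SOURCE B (Python) =====
-- def _take(pred, k, start):
--     out = []
--     n = start
--     while len(out) < k:
--         if pred(n):
--             out.append(n)
--         n += 1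
--     return out
--
--
-- def _select_numbers(BSH=0, NBSL=0, NBSH=0, BSL=0, startingNumber=3):
--     return {
--         "BSH": _take(lambda n: n % 2 != 0 and n % 3 == 0, BSH, startingNumber),
--         "NBSL": _take(lambda n: n % 2 == 0 and n % 3 != 0, NBSL, startingNumber),
--         "NBSH": _take(lambda n: n % 2 != 0 and n % 3 != 0, NBSH, startingNumber),
--         "BSL": _take(lambda n: n % 2 == 0 and n % 3 == 0, BSL, startingNumber),
--     }
-- ===== Notes on version B (the rewrite author's own statement) =====
-- stated objective: simpler
-- what changed: Replaces the single interleaved shared-state scan with four independent per-category passes: a small helper takes the first k integers from startingNumber satisfying each category's residue predicate; the four mod-6 classes partition the integers, so the independent passes yield exactly the interleaved result.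
import Mathlib
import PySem

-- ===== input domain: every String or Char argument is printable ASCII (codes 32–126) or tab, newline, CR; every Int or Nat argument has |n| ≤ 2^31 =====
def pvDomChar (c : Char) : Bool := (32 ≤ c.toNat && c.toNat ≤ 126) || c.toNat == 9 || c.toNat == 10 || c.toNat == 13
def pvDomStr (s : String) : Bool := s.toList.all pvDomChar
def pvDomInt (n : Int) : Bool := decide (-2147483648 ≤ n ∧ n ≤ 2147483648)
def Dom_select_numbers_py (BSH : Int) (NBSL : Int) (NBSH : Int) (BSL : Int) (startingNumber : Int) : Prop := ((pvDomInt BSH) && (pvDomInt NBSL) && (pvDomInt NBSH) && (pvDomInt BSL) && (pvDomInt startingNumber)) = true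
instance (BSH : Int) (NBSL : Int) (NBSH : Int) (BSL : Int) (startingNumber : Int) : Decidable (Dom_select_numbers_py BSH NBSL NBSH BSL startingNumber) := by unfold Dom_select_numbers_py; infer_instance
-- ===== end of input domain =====

-- B replaces A's interleaved shared-state scan by four independent per-category filtered passes (objective: simpler).

-- ===== PORT A =====
-- fuel guard making the while-loop total; 6*(total requested)+6 steps always suffice
-- (every window of 6 consecutive integers contains a member of each of the four mod-6 classes)
def pvFuel (BSH : Int) (NBSL : Int) (NBSH : Int) (BSL : Int) : Nat :=
  (6 * (max BSH 0 + max NBSL 0 + max NBSH 0 + max BSL 0)).toNat + 6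

def pvLoopA (BSH : Int) (NBSL : Int) (NBSH : Int) (BSL : Int) :
    Nat → List Int → List Int → List Int → List Int → Int →
    List Int × List Int × List Int × List Int
  | 0, la, lb, lc, ld, _ => (la, lb, lc, ld)
  | f+1, la, lb, lc, ld, n =>
    if (la.length : Int) < BSH ∨ (lb.length : Int) < NBSL ∨ (lc.length : Int) < NBSH ∨ (ld.length : Int) < BSL then
      if PySem.Int.mod n 2 ≠ 0 ∧ PySem.Int.mod n 3 = 0 ∧ (la.length : Int) < BSH then
        pvLoopA BSH NBSL NBSH BSL f (la ++ [n]) lb lc ld (n+1)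
      else if PySem.Int.mod n 2 = 0 ∧ PySem.Int.mod n 3 ≠ 0 ∧ (lb.length : Int) < NBSL then
        pvLoopA BSH NBSL NBSH BSL f la (lb ++ [n]) lc ld (n+1)
      else if PySem.Int.mod n 2 ≠ 0 ∧ PySem.Int.mod n 3 ≠ 0 ∧ (lc.length : Int) < NBSH then
        pvLoopA BSH NBSL NBSH BSL f la lb (lc ++ [n]) ld (n+1)
      else if PySem.Int.mod n 2 = 0 ∧ PySem.Int.mod n 3 = 0 ∧ (ld.length : Int) < BSL then
        pvLoopA BSH NBSL NBSH BSL f la lb lc (ld ++ [n]) (n+1)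
      else
        pvLoopA BSH NBSL NBSH BSL f la lb lc ld (n+1)
    else (la, lb, lc, ld)

def select_numbers_py (BSH : Int) (NBSL : Int) (NBSH : Int) (BSL : Int) (startingNumber : Int) : List (String × List Int) :=
  let r := pvLoopA BSH NBSL NBSH BSL (pvFuel BSH NBSL NBSH BSL) [] [] [] [] startingNumber
  [("BSH", r.1), ("NBSL", r.2.1), ("NBSH", r.2.2.1), ("BSL", r.2.2.2)]

-- ===== PORT B =====
def pvBSH (n : Int) : Bool := PySem.Int.mod n 2 != 0 && PySem.Int.mod n 3 == 0
def pvNBSL (n : Int) : Bool := PySem.Int.mod n 2 == 0 && PySem.Int.mod n 3 != 0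
def pvNBSH (n : Int) : Bool := PySem.Int.mod n 2 != 0 && PySem.Int.mod n 3 != 0
def pvBSL (n : Int) : Bool := PySem.Int.mod n 2 == 0 && PySem.Int.mod n 3 == 0

-- _take: first k integers from n upward satisfying p (fuel guard for totality)
def pvTake (p : Int → Bool) : Int → Nat → Int → List Int
  | _, 0, _ => []
  | k, f+1, n =>
    if 0 < k then
      if p n then n :: pvTake p (k-1) f (n+1) else pvTake p k f (n+1)
    else []

def select_numbers_py_alt (BSH : Int) (NBSL : Int) (NBSH : Int) (BSL : Int) (startingNumber : Int) : List (String × List Int) :=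
  let f := pvFuel BSH NBSL NBSH BSL
  [("BSH", pvTake pvBSH BSH f startingNumber),
   ("NBSL", pvTake pvNBSL NBSL f startingNumber),
   ("NBSH", pvTake pvNBSH NBSH f startingNumber),
   ("BSL", pvTake pvBSL BSL f startingNumber)]

-- ===== PRECONDITION & SPEC =====
def Spec_select_numbers_py (BSH : Int) (NBSL : Int) (NBSH : Int) (BSL : Int) (startingNumber : Int) (out : List (String × List Int)) : Prop := out = select_numbers_py_alt BSH NBSL NBSH BSL startingNumber
instance (BSH : Int) (NBSL : Int) (NBSH : Int) (BSL : Int) (startingNumber : Int) (out : List (String × List Int)) : Decidable (Spec_select_numbers_py BSH NBSL NBSH BSL startingNumber out) := by unfold Spec_select_numbers_py; infer_instance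

-- ===== CLAIM (what is proved, stated in full; the proofs are below) =====
def Claim_equal_select_numbers_py : Prop := ∀ (BSH : Int) (NBSL : Int) (NBSH : Int) (BSL : Int) (startingNumber : Int), Dom_select_numbers_py BSH NBSL NBSH BSL startingNumber → Spec_select_numbers_py BSH NBSL NBSH BSL startingNumber (select_numbers_py BSH NBSL NBSH BSL startingNumber)

-- ===== LEMMAS AND PROOFS =====
lemma pvTake_nil (p : Int → Bool) (k : Int) (f : Nat) (n : Int) (hk : ¬ 0 < k) :
    pvTake p k f n = [] := by
  cases f <;> simp [pvTake, hk]

lemma pvTake_skip (p : Int → Bool) (k : Int) (f : Nat) (n : Int)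
    (h : p n = false ∨ ¬ 0 < k) :
    pvTake p k (f+1) n = pvTake p k f (n+1) := by
  rcases h with h | h
  · by_cases hk : 0 < k
    · simp [pvTake, hk, h]
    · rw [pvTake_nil p k (f+1) n hk, pvTake_nil p k f (n+1) hk]
  · rw [pvTake_nil p k (f+1) n h, pvTake_nil p k f (n+1) h]

lemma pvTake_cons (p : Int → Bool) (k : Int) (f : Nat) (n : Int)
    (hk : 0 < k) (h : p n = true) :
    pvTake p k (f+1) n = n :: pvTake p (k-1) f (n+1) := by
  simp [pvTake, hk, h]

set_option maxHeartbeats 1000000 in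
lemma pvLoopA_decomp (BSH NBSL NBSH BSL : Int) :
    ∀ (f : Nat) (la lb lc ld : List Int) (n : Int),
    pvLoopA BSH NBSL NBSH BSL f la lb lc ld n =
      (la ++ pvTake pvBSH (BSH - la.length) f n,
       lb ++ pvTake pvNBSL (NBSL - lb.length) f n,
       lc ++ pvTake pvNBSH (NBSH - lc.length) f n,
       ld ++ pvTake pvBSL (BSL - ld.length) f n) := by
  intro f
  induction f with
  | zero => intro la lb lc ld n; simp [pvLoopA, pvTake]
  | succ f ih =>
    intro la lb lc ld n
    have hm2 : PySem.Int.mod n 2 = n % 2 := PySem.Int.mod_eq_emod_of_pos (by norm_num)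
    have hm3 : PySem.Int.mod n 3 = n % 3 := PySem.Int.mod_eq_emod_of_pos (by norm_num)
    have hBSH : pvBSH n = true ↔ (n % 2 ≠ 0 ∧ n % 3 = 0) := by simp [pvBSH]
    have hNBSL : pvNBSL n = true ↔ (n % 2 = 0 ∧ n % 3 ≠ 0) := by simp [pvNBSL]
    have hNBSH : pvNBSH n = true ↔ (n % 2 ≠ 0 ∧ n % 3 ≠ 0) := by simp [pvNBSH]
    have hBSL : pvBSL n = true ↔ (n % 2 = 0 ∧ n % 3 = 0) := by simp [pvBSL]
    simp only [pvLoopA, hm2, hm3]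
    split_ifs with hC h1 h2 h3 h4
    · -- BSH branch
      rw [ih]
      refine Prod.ext ?_ (Prod.ext ?_ (Prod.ext ?_ ?_))
      · rw [pvTake_cons pvBSH _ f n (by omega) (hBSH.mpr ⟨h1.1, h1.2.1⟩)]
        have hlen : (BSH - ((la ++ [n]).length : Int)) = BSH - la.length - 1 := by
          simp; ring
        rw [hlen]; simp
      · rw [pvTake_skip pvNBSL _ f n (Or.inl (by rw [← Bool.not_eq_true, hNBSL]; tauto))]
      · rw [pvTake_skip pvNBSH _ f n (Or.inl (by rw [← Bool.not_eq_true, hNBSH]; tauto))]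
      · rw [pvTake_skip pvBSL _ f n (Or.inl (by rw [← Bool.not_eq_true, hBSL]; tauto))]
    · -- NBSL branch
      rw [ih]
      refine Prod.ext ?_ (Prod.ext ?_ (Prod.ext ?_ ?_))
      · rw [pvTake_skip pvBSH _ f n (Or.inl (by rw [← Bool.not_eq_true, hBSH]; tauto))]
      · rw [pvTake_cons pvNBSL _ f n (by omega) (hNBSL.mpr ⟨h2.1, h2.2.1⟩)]
        have hlen : (NBSL - ((lb ++ [n]).length : Int)) = NBSL - lb.length - 1 := by
          simp; ring
        rw [hlen]; simp
      · rw [pvTake_skip pvNBSH _ f n (Or.inl (by rw [← Bool.not_eq_true, hNBSH]; tauto))]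
      · rw [pvTake_skip pvBSL _ f n (Or.inl (by rw [← Bool.not_eq_true, hBSL]; tauto))]
    · -- NBSH branch
      rw [ih]
      refine Prod.ext ?_ (Prod.ext ?_ (Prod.ext ?_ ?_))
      · rw [pvTake_skip pvBSH _ f n (Or.inl (by rw [← Bool.not_eq_true, hBSH]; tauto))]
      · rw [pvTake_skip pvNBSL _ f n (Or.inl (by rw [← Bool.not_eq_true, hNBSL]; tauto))]
      · rw [pvTake_cons pvNBSH _ f n (by omega) (hNBSH.mpr ⟨h3.1, h3.2.1⟩)]
        have hlen : (NBSH - ((lc ++ [n]).length : Int)) = NBSH - lc.length - 1 := by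
          simp; ring
        rw [hlen]; simp
      · rw [pvTake_skip pvBSL _ f n (Or.inl (by rw [← Bool.not_eq_true, hBSL]; tauto))]
    · -- BSL branch
      rw [ih]
      refine Prod.ext ?_ (Prod.ext ?_ (Prod.ext ?_ ?_))
      · rw [pvTake_skip pvBSH _ f n (Or.inl (by rw [← Bool.not_eq_true, hBSH]; tauto))]
      · rw [pvTake_skip pvNBSL _ f n (Or.inl (by rw [← Bool.not_eq_true, hNBSL]; tauto))]
      · rw [pvTake_skip pvNBSH _ f n (Or.inl (by rw [← Bool.not_eq_true, hNBSH]; tauto))]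
      · rw [pvTake_cons pvBSL _ f n (by omega) (hBSL.mpr ⟨h4.1, h4.2.1⟩)]
        have hlen : (BSL - ((ld ++ [n]).length : Int)) = BSL - ld.length - 1 := by
          simp; ring
        rw [hlen]; simp
    · -- no branch fired
      rw [ih]
      refine Prod.ext ?_ (Prod.ext ?_ (Prod.ext ?_ ?_))
      · have halt : pvBSH n = false ∨ ¬ 0 < (BSH - (la.length : Int)) := by
          by_cases hp : pvBSH n = true
          · exact Or.inr (by have := hBSH.mp hp; omega)
          · exact Or.inl (by simpa using hp)
        rw [pvTake_skip _ _ f n halt]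
      · have halt : pvNBSL n = false ∨ ¬ 0 < (NBSL - (lb.length : Int)) := by
          by_cases hp : pvNBSL n = true
          · exact Or.inr (by have := hNBSL.mp hp; omega)
          · exact Or.inl (by simpa using hp)
        rw [pvTake_skip _ _ f n halt]
      · have halt : pvNBSH n = false ∨ ¬ 0 < (NBSH - (lc.length : Int)) := by
          by_cases hp : pvNBSH n = true
          · exact Or.inr (by have := hNBSH.mp hp; omega)
          · exact Or.inl (by simpa using hp)
        rw [pvTake_skip _ _ f n halt]
      · have halt : pvBSL n = false ∨ ¬ 0 < (BSL - (ld.length : Int)) := by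
          by_cases hp : pvBSL n = true
          · exact Or.inr (by have := hBSL.mp hp; omega)
          · exact Or.inl (by simpa using hp)
        rw [pvTake_skip _ _ f n halt]
    · -- loop finished
      push Not at hC
      rw [pvTake_nil pvBSH _ _ _ (by omega), pvTake_nil pvNBSL _ _ _ (by omega),
          pvTake_nil pvNBSH _ _ _ (by omega), pvTake_nil pvBSL _ _ _ (by omega)]
      simp

-- ===== VERDICT (by name: the statement is the Claim_ definition above) =====
theorem select_numbers_py_spec : Claim_equal_select_numbers_py := by
  intro BSH NBSL NBSH BSL s _
  unfold Spec_select_numbers_py select_numbers_py select_numbers_py_alt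
  rw [pvLoopA_decomp]
  simp
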